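-- pv_equiv track=rewrite | github.com/Peter-Sanders/Volleyball | main.py | assign_bracket_divisions
-- ===== SOURCE A (Python) =====
-- def assign_bracket_divisions(n_teams:int) -> list:
--     div_1 = []
--     div_2 = []
--     cntr = 0
--     target = 1
--
--     for i in range(n_teams):
--         team = i+1
--         if i == 0:
--             div_1.append(team)
--             target = 2
--             continue
--         if cntr < 2:
--             div_1, div_2 = assign_target_dev(team, target, div_1, div_2)
--             cntr += 1
--         else:
--             cntr = 1
--             if target == 1:
--                 target = 2
--             else:
--                 target = 1
--             div_1, div_2 = assign_target_dev(team, target, div_1, div_2)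
--     return [div_1, div_2]
--
-- def assign_target_dev(team:int, target:int, div_1:list, div_2:list) -> tuple:
--     if target == 1:
--         div_1.append(team)
--     else:
--         div_2.append(team)
--     return div_1, div_2
-- ===== SOURCE B (Python) =====
-- def assign_bracket_divisions(n_teams: int) -> list:
--     # Snake seeding: team 1 then pairs alternate; t goes to division 1 iff t % 4 < 2.
--     div_1 = [t for t in range(1, n_teams + 1) if t % 4 < 2]
--     div_2 = [t for t in range(1, n_teams + 1) if t % 4 >= 2]
--     return [div_1, div_2]
-- ===== Notes on version B (the rewrite author's own statement) =====
-- stated objective: simpler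
-- what changed: Replaces the stateful cntr/target flip-flop machine and the assign_target_dev helper with two comprehensions that place each team by the closed-form residue test t mod 4 < 2.
import Mathlib
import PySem

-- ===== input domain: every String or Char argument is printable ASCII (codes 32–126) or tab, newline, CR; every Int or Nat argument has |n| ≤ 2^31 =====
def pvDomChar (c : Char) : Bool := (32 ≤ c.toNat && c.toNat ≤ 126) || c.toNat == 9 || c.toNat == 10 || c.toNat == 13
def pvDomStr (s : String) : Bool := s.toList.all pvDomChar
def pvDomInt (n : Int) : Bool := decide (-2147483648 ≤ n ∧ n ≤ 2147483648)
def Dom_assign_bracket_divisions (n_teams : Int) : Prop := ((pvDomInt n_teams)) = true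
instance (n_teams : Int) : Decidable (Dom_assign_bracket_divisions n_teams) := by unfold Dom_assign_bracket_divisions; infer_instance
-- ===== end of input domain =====

-- B replaces A's stateful cntr/target flip-flop machine (and the assign_target_dev helper)
-- with two comprehensions placing team t by the closed-form test t % 4 < 2 (objective: simpler).

-- ===== PORT A =====
def assign_target_dev (team : Int) (target : Int) (div_1 div_2 : List Int) :
    List Int × List Int :=
  if target == 1 then (div_1 ++ [team], div_2) else (div_1, div_2 ++ [team])

def pvAStep (s : (List Int × List Int) × Int × Int) (i : Int) :
    (List Int × List Int) × Int × Int :=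
  let team := i + 1
  if i == 0 then
    ((s.1.1 ++ [team], s.1.2), s.2.1, 2)
  else if s.2.1 < 2 then
    (assign_target_dev team s.2.2 s.1.1 s.1.2, s.2.1 + 1, s.2.2)
  else
    let target := if s.2.2 == 1 then (2 : Int) else 1
    (assign_target_dev team target s.1.1 s.1.2, 1, target)

def assign_bracket_divisions (n_teams : Int) : List (List Int) :=
  let s := (PySem.List.pyRange 0 n_teams 1).foldl pvAStep (([], []), 0, 1)
  [s.1.1, s.1.2]

-- ===== PORT B =====
def assign_bracket_divisions_alt (n_teams : Int) : List (List Int) :=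
  let div_1 := (PySem.List.pyRange 1 (n_teams + 1) 1).filter
    (fun t => decide (PySem.Int.mod t 4 < 2))
  let div_2 := (PySem.List.pyRange 1 (n_teams + 1) 1).filter
    (fun t => decide (PySem.Int.mod t 4 ≥ 2))
  [div_1, div_2]

-- ===== PRECONDITION & SPEC =====
def Spec_assign_bracket_divisions (n_teams : Int) (out : List (List Int)) : Prop := out = assign_bracket_divisions_alt n_teams
instance (n_teams : Int) (out : List (List Int)) : Decidable (Spec_assign_bracket_divisions n_teams out) := by unfold Spec_assign_bracket_divisions; infer_instance

-- ===== CLAIM (what is proved, stated in full; the proofs are below) =====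
def Claim_equal_assign_bracket_divisions : Prop := ∀ (n_teams : Int), Dom_assign_bracket_divisions n_teams → Spec_assign_bracket_divisions n_teams (assign_bracket_divisions n_teams)

-- ===== LEMMAS AND PROOFS =====

-- counter value after the loop has processed teams 1..k
def pvCnt (k : Nat) : Int := if k ≤ 1 then 0 else if k % 2 = 0 then 1 else 2
-- target value after the loop has processed teams 1..k
def pvTgt (k : Nat) : Int :=
  if k = 0 then 1 else if k = 1 then 2 else if k % 4 ≤ 1 then 1 else 2

def pvF1 (k : Nat) : List Int :=
  (PySem.List.pyRange 1 ((k : Int) + 1) 1).filter (fun t => decide (PySem.Int.mod t 4 < 2))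
def pvF2 (k : Nat) : List Int :=
  (PySem.List.pyRange 1 ((k : Int) + 1) 1).filter (fun t => decide (PySem.Int.mod t 4 ≥ 2))

lemma pvF1_succ (k : Nat) :
    pvF1 (k + 1) = pvF1 k ++ (if ((k : Int) + 1) % 4 ≤ 1 then [(k : Int) + 1] else []) := by
  unfold pvF1
  rw [show (((k + 1 : Nat) : Int) + 1) = ((k : Int) + 1) + 1 by push_cast; ring,
    PySem.List.pyRange_one_succ_right (by omega), List.filter_append]
  by_cases h : ((k : Int) + 1) % 4 ≤ 1 <;>
    simp [List.filter, h,
      show ((k : Int) + 1) % 4 < 2 ↔ ((k : Int) + 1) % 4 ≤ 1 from by omega]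

lemma pvF2_succ (k : Nat) :
    pvF2 (k + 1) = pvF2 k ++ (if ((k : Int) + 1) % 4 ≤ 1 then [] else [(k : Int) + 1]) := by
  unfold pvF2
  rw [show (((k + 1 : Nat) : Int) + 1) = ((k : Int) + 1) + 1 by push_cast; ring,
    PySem.List.pyRange_one_succ_right (by omega), List.filter_append]
  by_cases h : ((k : Int) + 1) % 4 ≤ 1 <;>
    simp [List.filter, h,
      show 2 ≤ ((k : Int) + 1) % 4 ↔ ¬ ((k : Int) + 1) % 4 ≤ 1 from by omega]

lemma pvLoop (k : Nat) :
    (PySem.List.pyRange 0 (k : Int) 1).foldl pvAStep (([], []), 0, 1)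
      = ((pvF1 k, pvF2 k), pvCnt k, pvTgt k) := by
  induction k with
  | zero => simp [PySem.List.pyRange_one_eq_nil, pvF1, pvF2, pvCnt, pvTgt]
  | succ k ih =>
    have hsplit : PySem.List.pyRange 0 ((k + 1 : Nat) : Int) 1
        = PySem.List.pyRange 0 (k : Int) 1 ++ [(k : Int)] := by
      push_cast
      exact PySem.List.pyRange_one_succ_right (by positivity)
    rw [hsplit, List.foldl_append, ih, List.foldl, List.foldl, pvF1_succ, pvF2_succ]
    rcases Nat.eq_zero_or_pos k with h0 | hk1
    · subst h0; decide
    · have hk0 : ¬ ((k : Int) = 0) := by omega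
      simp only [pvAStep, assign_target_dev, beq_iff_eq, if_neg hk0]
      by_cases hk : k = 1
      · subst hk
        norm_num [pvCnt, pvTgt]
      · have h2 : 2 ≤ k := by omega
        have h4 : k % 4 = 0 ∨ k % 4 = 1 ∨ k % 4 = 2 ∨ k % 4 = 3 := by omega
        have hc : pvCnt k = if k % 2 = 0 then 1 else 2 := by
          unfold pvCnt; rw [if_neg (by omega)]
        have hc' : pvCnt (k + 1) = if k % 2 = 0 then 2 else 1 := by
          unfold pvCnt; rw [if_neg (by omega)]; split_ifs <;> omega
        have ht : pvTgt k = if k % 4 ≤ 1 then 1 else 2 := by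
          unfold pvTgt; rw [if_neg (by omega), if_neg (by omega)]
        have ht' : pvTgt (k + 1) = if (k + 1) % 4 ≤ 1 then 1 else 2 := by
          unfold pvTgt; rw [if_neg (by omega), if_neg (by omega)]
        rw [hc, hc', ht, ht']
        rcases h4 with h4 | h4 | h4 | h4
        · simp only [h4, show k % 2 = 0 from by omega,
            show (k + 1) % 4 = 1 from by omega, show ((k : Int) + 1) % 4 = 1 from by omega]
          norm_num
        · simp only [h4, show k % 2 = 1 from by omega,
            show (k + 1) % 4 = 2 from by omega, show ((k : Int) + 1) % 4 = 2 from by omega]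
          norm_num
        · simp only [h4, show k % 2 = 0 from by omega,
            show (k + 1) % 4 = 3 from by omega, show ((k : Int) + 1) % 4 = 3 from by omega]
          norm_num
        · simp only [h4, show k % 2 = 1 from by omega,
            show (k + 1) % 4 = 0 from by omega, show ((k : Int) + 1) % 4 = 0 from by omega]
          norm_num

theorem pv_eq (n : Int) :
    assign_bracket_divisions n = assign_bracket_divisions_alt n := by
  unfold assign_bracket_divisions assign_bracket_divisions_alt
  rcases le_or_gt n 0 with hn | hn
  · rw [PySem.List.pyRange_one_eq_nil (by omega : n ≤ 0),
      PySem.List.pyRange_one_eq_nil (by omega : n + 1 ≤ 1)]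
    rfl
  · have hcast : n = ((n.toNat : Nat) : Int) := by omega
    rw [hcast, pvLoop]
    simp [pvF1, pvF2]

-- ===== VERDICT (by name: the statement is the Claim_ definition above) =====
theorem assign_bracket_divisions_spec : Claim_equal_assign_bracket_divisions := by
  intro n _
  unfold Spec_assign_bracket_divisions
  exact pv_eq n
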